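-- pv_equiv track=rewrite | github.com/PeerLabs-ai/plsec | src/plsec/commands/integrity.py | compare_manifests
-- ===== SOURCE A (Python) =====
-- def compare_manifests(old: dict, new: dict) -> dict:
--     """Compare two manifests and return differences."""
--     old_files = old.get("files", {})
--     new_files = new.get("files", {})
--
--     added = set(new_files.keys()) - set(old_files.keys())
--     removed = set(old_files.keys()) - set(new_files.keys())
--     modified = set()
--
--     for path in set(old_files.keys()) & set(new_files.keys()):
--         if old_files[path]["sha256"] != new_files[path]["sha256"]:
--             modified.add(path)
--
--     return {
--         "added": sorted(added),
--         "removed": sorted(removed),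
--         "modified": sorted(modified),
--     }
-- ===== SOURCE B (Python) =====
-- def compare_manifests(old: dict, new: dict) -> dict:
--     """Compare two manifests and return differences."""
--     old_files = old.get("files", {})
--     new_files = new.get("files", {})
--
--     added, removed, modified = [], [], []
--     for path in {**old_files, **new_files}:  # one pass over the union of paths
--         if path not in old_files:
--             added.append(path)
--         elif path not in new_files:
--             removed.append(path)
--         elif old_files[path]["sha256"] != new_files[path]["sha256"]:
--             modified.append(path)
--
--     return {
--         "added": sorted(added),
--         "removed": sorted(removed),
--         "modified": sorted(modified),
--     }
-- ===== Notes on version B (the rewrite author's own statement) =====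
-- stated objective: simpler
-- what changed: replaces the two set differences plus a separate intersection loop with a single pass over the union of paths that classifies each path into added/removed/modified
import Mathlib
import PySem

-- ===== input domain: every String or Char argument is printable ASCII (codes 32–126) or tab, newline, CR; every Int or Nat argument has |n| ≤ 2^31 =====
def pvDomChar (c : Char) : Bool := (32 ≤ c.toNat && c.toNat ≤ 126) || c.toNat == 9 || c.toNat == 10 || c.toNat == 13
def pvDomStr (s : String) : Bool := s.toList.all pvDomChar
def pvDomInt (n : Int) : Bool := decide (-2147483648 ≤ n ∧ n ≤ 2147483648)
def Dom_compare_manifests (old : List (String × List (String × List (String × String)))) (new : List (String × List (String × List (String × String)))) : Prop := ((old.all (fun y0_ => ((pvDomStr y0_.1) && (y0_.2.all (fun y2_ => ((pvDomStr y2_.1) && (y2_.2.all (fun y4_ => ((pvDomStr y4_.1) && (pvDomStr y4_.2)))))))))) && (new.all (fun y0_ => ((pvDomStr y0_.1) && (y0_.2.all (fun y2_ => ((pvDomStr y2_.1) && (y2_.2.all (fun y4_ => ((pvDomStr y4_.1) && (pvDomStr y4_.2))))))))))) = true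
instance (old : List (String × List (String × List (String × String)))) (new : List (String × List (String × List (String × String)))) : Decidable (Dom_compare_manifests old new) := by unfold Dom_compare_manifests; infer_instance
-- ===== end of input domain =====

-- B replaces A's two set differences plus intersection loop with ONE pass over the union
-- of paths classifying each path into added/removed/modified (objective: simpler; same cost).

-- ===== PORT A =====
-- shared lookup helper: files[path]["sha256"] (KeyError excluded by Pre_; "" stands for the excluded raise)
def pvSha (files : List (String × List (String × String))) (path : String) : String :=
  PySem.Dict.getD (PySem.Dict.mk (PySem.Dict.getD (PySem.Dict.mk files) path [])) "sha256" ""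

def compare_manifests (old : List (String × List (String × List (String × String)))) (new : List (String × List (String × List (String × String)))) : List (String × List String) :=
  let old_files := PySem.Dict.getD (PySem.Dict.mk old) "files" []
  let new_files := PySem.Dict.getD (PySem.Dict.mk new) "files" []
  let added := PySem.Set.diff (PySem.Set.ofList (new_files.map (·.1))) (PySem.Set.ofList (old_files.map (·.1)))
  let removed := PySem.Set.diff (PySem.Set.ofList (old_files.map (·.1))) (PySem.Set.ofList (new_files.map (·.1)))
  let modified := (PySem.Set.inter (PySem.Set.ofList (old_files.map (·.1))) (PySem.Set.ofList (new_files.map (·.1)))).foldl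
      (fun s path => if pvSha old_files path != pvSha new_files path then PySem.Set.add s path else s)
      PySem.Set.empty
  [("added", PySem.List.sorted added (fun x => x) false),
   ("removed", PySem.List.sorted removed (fun x => x) false),
   ("modified", PySem.List.sorted modified (fun x => x) false)]

-- ===== PORT B =====
def compare_manifests_alt (old : List (String × List (String × List (String × String)))) (new : List (String × List (String × List (String × String)))) : List (String × List String) :=
  let old_files := PySem.Dict.getD (PySem.Dict.mk old) "files" []
  let new_files := PySem.Dict.getD (PySem.Dict.mk new) "files" []
  -- {**old_files, **new_files} iterated over its keys: old keys then new-only keys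
  let acc := (PySem.Set.update (PySem.Set.ofList (old_files.map (·.1))) (new_files.map (·.1))).foldl
      (fun (acc : List String × List String × List String) path =>
        if !(PySem.Dict.mk old_files).contains path then (acc.1 ++ [path], acc.2.1, acc.2.2)
        else if !(PySem.Dict.mk new_files).contains path then (acc.1, acc.2.1 ++ [path], acc.2.2)
        else if pvSha old_files path != pvSha new_files path then (acc.1, acc.2.1, acc.2.2 ++ [path])
        else acc)
      ([], [], [])
  [("added", PySem.List.sorted acc.1 (fun x => x) false),
   ("removed", PySem.List.sorted acc.2.1 (fun x => x) false),
   ("modified", PySem.List.sorted acc.2.2 (fun x => x) false)]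

-- ===== PRECONDITION & SPEC =====
-- Pre_ excludes exactly the inputs where the Python raises KeyError: a path present in both
-- manifests' "files" dicts whose entry (on either side) has no "sha256" key.
def Pre_compare_manifests (old : List (String × List (String × List (String × String)))) (new : List (String × List (String × List (String × String)))) : Prop :=
  let old_files := PySem.Dict.getD (PySem.Dict.mk old) "files" []
  let new_files := PySem.Dict.getD (PySem.Dict.mk new) "files" []
  ∀ p ∈ old_files.map (·.1), p ∈ new_files.map (·.1) →
    (PySem.Dict.mk (PySem.Dict.getD (PySem.Dict.mk old_files) p [])).contains "sha256" = true ∧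
    (PySem.Dict.mk (PySem.Dict.getD (PySem.Dict.mk new_files) p [])).contains "sha256" = true
instance (old : List (String × List (String × List (String × String)))) (new : List (String × List (String × List (String × String)))) : Decidable (Pre_compare_manifests old new) := by unfold Pre_compare_manifests; infer_instance

def pvWitness_compare_manifests : (List (String × List (String × List (String × String)))) × (List (String × List (String × List (String × String)))) :=
  ([("files", [("a", [("sha256", "h1")]), ("b", [("sha256", "h2")])])],
   [("files", [("a", [("sha256", "h9")]), ("c", [("sha256", "h3")])])])

def Spec_compare_manifests (old : List (String × List (String × List (String × String)))) (new : List (String × List (String × List (String × String)))) (out : List (String × List String)) : Prop := out = compare_manifests_alt old new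
instance (old : List (String × List (String × List (String × String)))) (new : List (String × List (String × List (String × String)))) (out : List (String × List String)) : Decidable (Spec_compare_manifests old new out) := by unfold Spec_compare_manifests; infer_instance

-- ===== CLAIM (what is proved, stated in full; the proofs are below) =====
def Claim_equal_compare_manifests : Prop := ∀ (old : List (String × List (String × List (String × String)))) (new : List (String × List (String × List (String × String)))), Dom_compare_manifests old new → Pre_compare_manifests old new → Spec_compare_manifests old new (compare_manifests old new)

-- ===== LEMMAS AND PROOFS =====

-- B's single classification loop is three filters of the traversed list
theorem foldB_eq_filters (inO inN c : String → Bool) (l : List String) (a b d : List String) :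
    l.foldl
      (fun (acc : List String × List String × List String) p =>
        if !inO p then (acc.1 ++ [p], acc.2.1, acc.2.2)
        else if !inN p then (acc.1, acc.2.1 ++ [p], acc.2.2)
        else if c p then (acc.1, acc.2.1, acc.2.2 ++ [p])
        else acc) (a, b, d)
    = (a ++ l.filter (fun p => !inO p),
       b ++ l.filter (fun p => inO p && !inN p),
       d ++ l.filter (fun p => inO p && inN p && c p)) := by
  induction l generalizing a b d with
  | nil => simp
  | cons x xs ih =>
    simp only [List.foldl_cons, List.filter_cons]
    by_cases h1 : inO x <;> by_cases h2 : inN x <;> by_cases h3 : c x <;>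
      simp only [h1, h2, h3, Bool.not_true, Bool.not_false, Bool.false_eq_true, if_true,
        if_false] <;>
      rw [ih] <;> simp

-- A's set-building loop over a nodup list is a filter
theorem foldA_eq_filter (c : String → Bool) (l : List String) :
    ∀ acc : List String, l.Nodup → (∀ x ∈ l, x ∉ acc) →
    l.foldl (fun s p => if c p then PySem.Set.add s p else s) acc = acc ++ l.filter c := by
  induction l with
  | nil => intro acc _ _; simp
  | cons x xs ih =>
    intro acc hn h
    simp only [List.foldl_cons, List.filter_cons]
    by_cases hc : c x
    · simp only [hc, if_true, ite_true]
      rw [PySem.Set.add_of_not_mem (h x (by simp))]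
      rw [ih (acc ++ [x]) hn.of_cons ?_]
      · simp
      · intro y hy hmem
        rcases List.mem_append.mp hmem with hya | hyx
        · exact h y (by simp [hy]) hya
        · exact (List.nodup_cons.mp hn).1 (by simpa using (List.mem_singleton.mp hyx ▸ hy))
    · simp only [hc, if_false, Bool.false_eq_true]
      exact ih acc hn.of_cons (fun y hy => h y (by simp [hy]))

theorem sorted_eq_of_mem_iff {xs ys : List String} (hx : xs.Nodup) (hy : ys.Nodup)
    (h : ∀ a, a ∈ xs ↔ a ∈ ys) :
    PySem.List.sorted xs (fun x => x) false = PySem.List.sorted ys (fun x => x) false :=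
  (PySem.List.sorted_id_eq_sorted_id_iff_perm xs ys).mpr ((List.perm_ext_iff_of_nodup hx hy).mpr h)

theorem contains_mk_iff (l : List (String × List (String × String))) (p : String) :
    (PySem.Dict.mk l).contains p = true ↔ p ∈ l.map (·.1) := by
  simp [PySem.Dict.contains_iff_mem_keys (PySem.Dict.mk l) p]

theorem not_contains_mk_iff (l : List (String × List (String × String))) (p : String) :
    (!(PySem.Dict.mk l).contains p) = true ↔ p ∉ l.map (·.1) := by
  rw [Bool.not_eq_true', ← Bool.not_eq_true, contains_mk_iff]

theorem compare_manifests_spec : Claim_equal_compare_manifests := by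
  intro old new _ _
  unfold Spec_compare_manifests compare_manifests compare_manifests_alt
  simp only []
  set of_ := PySem.Dict.getD (PySem.Dict.mk old) "files" [] with hof
  set nf_ := PySem.Dict.getD (PySem.Dict.mk new) "files" [] with hnf
  rw [foldB_eq_filters]
  rw [foldA_eq_filter _ _ PySem.Set.empty
        (PySem.Set.nodup_inter _ _ (PySem.Set.nodup_ofList _))
        (by intro x _ hx; simp [PySem.Set.empty] at hx)]
  have hu : (PySem.Set.update (PySem.Set.ofList (of_.map (·.1))) (nf_.map (·.1))).Nodup :=
    PySem.Set.nodup_update _ _ (PySem.Set.nodup_ofList _)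
  have e1 := sorted_eq_of_mem_iff
    (PySem.Set.nodup_diff (PySem.Set.ofList (nf_.map (·.1))) (PySem.Set.ofList (of_.map (·.1)))
      (PySem.Set.nodup_ofList _))
    (List.Nodup.filter (fun p => !(PySem.Dict.mk of_).contains p) hu)
    (by
      intro a
      simp only [PySem.Set.mem_diff, PySem.Set.mem_ofList, List.mem_filter,
        PySem.Set.mem_update, not_contains_mk_iff]
      tauto)
  have e2 := sorted_eq_of_mem_iff
    (PySem.Set.nodup_diff (PySem.Set.ofList (of_.map (·.1))) (PySem.Set.ofList (nf_.map (·.1)))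
      (PySem.Set.nodup_ofList _))
    (List.Nodup.filter (fun p => (PySem.Dict.mk of_).contains p && !(PySem.Dict.mk nf_).contains p) hu)
    (by
      intro a
      simp only [PySem.Set.mem_diff, PySem.Set.mem_ofList, List.mem_filter,
        PySem.Set.mem_update, Bool.and_eq_true, not_contains_mk_iff, contains_mk_iff]
      tauto)
  have e3 := sorted_eq_of_mem_iff
    (List.Nodup.filter (fun p => pvSha of_ p != pvSha nf_ p)
      (PySem.Set.nodup_inter _ (PySem.Set.ofList (nf_.map (·.1))) (PySem.Set.nodup_ofList _)))
    (List.Nodup.filter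
      (fun p => (PySem.Dict.mk of_).contains p && ((PySem.Dict.mk nf_).contains p && (pvSha of_ p != pvSha nf_ p))) hu)
    (by
      intro a
      simp only [List.mem_filter, PySem.Set.mem_inter, PySem.Set.mem_ofList,
        PySem.Set.mem_update, Bool.and_eq_true, contains_mk_iff]
      tauto)
  simp only [List.nil_append, PySem.Set.empty] at *
  simp only [e1, e2, e3]
  simp only [Bool.and_assoc]
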